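-- pv_equiv track=rewrite | github.com/toniale/DSC20 | homeworks/hw06.py | skip_then_swap
-- ===== SOURCE A (Python) =====
-- def skip_then_swap(string, n_skip, n_swap):
--     """
--     This function recursively swaps and skips characters in a string by pairs.
--     It first skips n_skip amount of pairs and then swaps by n_swaps.
--     A pair is one of the first character and one of the last. Multiple pairs
--     continue with this pattern of pairing a character from the beginning
--     and one at the end. A string would be returned after all operations.
--
--     >>> skip_then_swap('kkkABXXXXCDkkk', 3, 2)
--     'kkkDCXXXXBAkkk'
--     >>> skip_then_swap('DSC20', 1, 2)
--     'D2CS0'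
--     >>> skip_then_swap('skip_then_swap', 4, 3)
--     'skip_neht_swap'
--     >>> skip_then_swap('T', 2, 2)
--     'T'
--     >>> skip_then_swap('happyholidaze', 2, 1)
--     'haapyholidpze'
--     >>> skip_then_swap('skskNOTURKEYsksk', 0, 0)
--     'skskNOTURKEYsksk'
--     """
--     if string == "":
--         return ""
--     if len(string) == 1:
--         return string
--     if n_swap == 0:
--         return string
--     else:
--         # reduce n_skip to zero
--         if n_skip > 0:
--             return string[0] + \
--                     skip_then_swap(string[1:-1], n_skip - 1, n_swap) + \
--                     string[-1]
--         # reduce n_swap to zero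
--         if n_skip == 0:
--             return string[-1] + \
--                     skip_then_swap(string[1:-1], 0, n_swap - 1) + \
--                     string[0]
-- ===== SOURCE B (Python) =====
-- def skip_then_swap(string, n_skip, n_swap):
--     """Two-pointer single pass: walk inward from both ends, skipping the
--     first n_skip pairs, then swapping pairs in place while n_swap lasts."""
--     chars = list(string)
--     i, j = 0, len(chars) - 1
--     while i < j and n_swap != 0:
--         if n_skip > 0:
--             n_skip -= 1
--         else:
--             chars[i], chars[j] = chars[j], chars[i]
--             n_swap -= 1
--         i += 1
--         j -= 1
--     return ''.join(chars)
-- ===== Notes on version B (the rewrite author's own statement) =====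
-- stated objective: faster
-- what changed: Replaces A's pair-by-pair recursion (which copies string[1:-1] at every level) by a single in-place two-pointer pass over a char list, decrementing the skip and swap counters as the pointers move inward; Pre_ excludes only the inputs (length >= 2, n_swap != 0, n_skip < 0) on which A falls off the end of the function and returns None instead of a str.
-- outside the precondition, e.g. on skip_then_swap('ab', -1, 1): A returns None, B returns 'ba'
import Mathlib
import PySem

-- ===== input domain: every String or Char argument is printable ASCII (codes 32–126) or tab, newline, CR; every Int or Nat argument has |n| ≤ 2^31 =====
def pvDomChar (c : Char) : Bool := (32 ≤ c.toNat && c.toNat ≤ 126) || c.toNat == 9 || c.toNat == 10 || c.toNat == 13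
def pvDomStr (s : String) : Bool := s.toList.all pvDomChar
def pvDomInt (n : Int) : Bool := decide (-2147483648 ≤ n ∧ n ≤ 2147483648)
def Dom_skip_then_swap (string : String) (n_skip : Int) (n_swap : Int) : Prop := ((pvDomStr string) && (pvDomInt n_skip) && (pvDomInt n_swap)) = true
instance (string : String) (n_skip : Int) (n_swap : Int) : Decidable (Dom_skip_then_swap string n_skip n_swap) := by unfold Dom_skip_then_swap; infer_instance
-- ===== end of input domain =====

-- B replaces A's pair-by-pair recursion (which copies the string at every level) by one
-- in-place two-pointer pass; equivalence is proved on Pre_ (outside it Python A returns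
-- None, not a str).

-- ===== PORT A =====
-- string[1:-1] is transliterated as l.tail.dropLast (exact for every list);
-- string[0] / string[-1] are headI / getLastD, exact here because they are only
-- read when the list is nonempty.
def skipAux (l : List Char) (n_skip : Int) (n_swap : Int) : List Char :=
  if l = [] then []
  else if l.length = 1 then l
  else if n_swap = 0 then l
  else if 0 < n_skip then
    l.headI :: skipAux l.tail.dropLast (n_skip - 1) n_swap ++ [l.getLastD ' ']
  else if n_skip = 0 then
    l.getLastD ' ' :: skipAux l.tail.dropLast 0 (n_swap - 1) ++ [l.headI]
  else l  -- Python A falls off the function and returns None here (n_skip < 0): excluded by Pre_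
termination_by l.length
decreasing_by
  all_goals
    cases l with
    | nil => simp_all
    | cons a t =>
        simp only [List.tail_cons, List.length_dropLast, List.length_cons]
        omega

def skip_then_swap (string : String) (n_skip : Int) (n_swap : Int) : String :=
  String.ofList (skipAux string.toList n_skip n_swap)

-- ===== PORT B =====
-- the while loop of Source B; chars[i] / chars[j] are getD (exact: they are only read
-- when i < j ≤ len - 1, so both indices are nonnegative and in range)
def altLoop (chars : List Char) (i j : Nat) (n_skip n_swap : Int) : List Char :=
  if i < j ∧ n_swap ≠ 0 then
    if 0 < n_skip then
      altLoop chars (i + 1) (j - 1) (n_skip - 1) n_swap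
    else
      altLoop ((chars.set i (chars.getD j ' ')).set j (chars.getD i ' '))
        (i + 1) (j - 1) n_skip (n_swap - 1)
  else chars
termination_by j - i

def skip_then_swap_alt (string : String) (n_skip : Int) (n_swap : Int) : String :=
  String.ofList (altLoop string.toList 0 (string.toList.length - 1) n_skip n_swap)

-- ===== PRECONDITION & SPEC =====
-- Pre_ excludes exactly the inputs (length ≥ 2, n_swap ≠ 0, n_skip < 0) on which Python A
-- falls off the end of the function and returns None instead of a str.
def Pre_skip_then_swap (string : String) (n_skip : Int) (n_swap : Int) : Prop :=
  string.toList.length ≤ 1 ∨ n_swap = 0 ∨ 0 ≤ n_skip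
instance (string : String) (n_skip : Int) (n_swap : Int) : Decidable (Pre_skip_then_swap string n_skip n_swap) := by unfold Pre_skip_then_swap; infer_instance

def pvWitness_skip_then_swap : String × Int × Int := ("DSC20", 1, 2)

def Spec_skip_then_swap (string : String) (n_skip : Int) (n_swap : Int) (out : String) : Prop := out = skip_then_swap_alt string n_skip n_swap
instance (string : String) (n_skip : Int) (n_swap : Int) (out : String) : Decidable (Spec_skip_then_swap string n_skip n_swap out) := by unfold Spec_skip_then_swap; infer_instance

-- ===== CLAIM (what is proved, stated in full; the proofs are below) =====
def Claim_equal_skip_then_swap : Prop := ∀ (string : String) (n_skip : Int) (n_swap : Int), Dom_skip_then_swap string n_skip n_swap → Pre_skip_then_swap string n_skip n_swap → Spec_skip_then_swap string n_skip n_swap (skip_then_swap string n_skip n_swap)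

-- ===== LEMMAS AND PROOFS =====

lemma skipAux_swap_zero (l : List Char) (k : Int) : skipAux l k 0 = l := by
  unfold skipAux
  split_ifs with h1 h2 <;> simp_all

lemma skipAux_short (l : List Char) (k s : Int) (hlen : l.length <= 1) : skipAux l k s = l := by
  cases l with
  | nil => rw [skipAux]; simp
  | cons c t =>
    have ht : t = [] := by simp at hlen; omega
    subst ht
    rw [skipAux]; simp

lemma decomp (l : List Char) (h : 2 <= l.length) :
    ∃ (a b : Char) (m : List Char), l = a :: (m ++ [b]) := by
  cases l with
  | nil => simp at h
  | cons a t =>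
    have ht : t ≠ [] := by cases t <;> simp_all
    exact ⟨a, t.getLast ht, t.dropLast, by simp [List.dropLast_concat_getLast ht]⟩

-- one skip step of A on a decomposed list
lemma skipAux_skip (a b : Char) (m : List Char) (k s : Int) (hk : 0 < k) (hs : s ≠ 0) :
    skipAux (a :: (m ++ [b])) k s = a :: (skipAux m (k - 1) s ++ [b]) := by
  rw [skipAux]
  simp only [if_neg (show ¬(a :: (m ++ [b])) = [] by simp),
    if_neg (show ¬(a :: (m ++ [b])).length = 1 by simp),
    if_neg hs, if_pos hk]
  have hl : (a :: (m ++ [b])).getLast? = some b := by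
    rw [← List.cons_append]; exact List.getLast?_concat
  simp [hl]

-- one swap step of A on a decomposed list
lemma skipAux_swap (a b : Char) (m : List Char) (s : Int) (hs : s ≠ 0) :
    skipAux (a :: (m ++ [b])) 0 s = b :: (skipAux m 0 (s - 1) ++ [a]) := by
  rw [skipAux]
  simp only [if_neg (show ¬(a :: (m ++ [b])) = [] by simp),
    if_neg (show ¬(a :: (m ++ [b])).length = 1 by simp),
    if_neg hs, if_neg (show ¬(0:Int) < 0 by omega)]
  have hl : (a :: (m ++ [b])).getLast? = some b := by
    rw [← List.cons_append]; exact List.getLast?_concat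
  simp [hl]

lemma getD_shift (P R : List Char) (n : Nat) :
    (P ++ R).getD (P.length + n) ' ' = R.getD n ' ' := by
  simp [List.getD_eq_getElem?_getD,
    List.getElem?_append_right (show P.length <= P.length + n by omega)]

lemma getD_mid_left (P : List Char) (a : Char) (R : List Char) :
    (P ++ a :: R).getD P.length ' ' = a := by
  simpa using getD_shift P (a :: R) 0

lemma getD_mid_right (P : List Char) (a : Char) (M : List Char) (b : Char) (S : List Char) :
    (P ++ a :: (M ++ b :: S)).getD (P.length + M.length + 1) ' ' = b := by
  have h := getD_shift P (a :: (M ++ b :: S)) (M.length + 1)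
  rw [show P.length + M.length + 1 = P.length + (M.length + 1) by omega, h,
    List.getD_cons_succ, getD_mid_left M b S]

lemma set_shift (P R : List Char) (n : Nat) (c : Char) :
    (P ++ R).set (P.length + n) c = P ++ R.set n c := by
  induction P with
  | nil => simp
  | cons p t ih =>
    simp only [List.cons_append, List.length_cons]
    rw [show t.length + 1 + n = (t.length + n) + 1 by omega, List.set_cons_succ, ih]

lemma set_mid_left (P : List Char) (a c : Char) (R : List Char) :
    (P ++ a :: R).set P.length c = P ++ c :: R := by
  simpa using set_shift P (a :: R) 0 c

lemma set_mid_right (P : List Char) (a : Char) (M : List Char) (b c : Char) (S : List Char) :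
    (P ++ a :: (M ++ b :: S)).set (P.length + M.length + 1) c = P ++ a :: (M ++ c :: S) := by
  rw [show P.length + M.length + 1 = P.length + (M.length + 1) by omega,
    set_shift P (a :: (M ++ b :: S)) (M.length + 1) c, List.set_cons_succ,
    set_mid_left M b c S]

-- the heart: B's loop on P ++ a :: (M ++ b :: S), with the pointers at a and b,
-- computes P ++ (A's recursion on a :: (M ++ [b])) ++ S, for 0 <= n_skip
lemma loop_inv (n : Nat) : ∀ (M P S : List Char) (a b : Char) (k s : Int),
    M.length = n → 0 <= k →
    altLoop (P ++ a :: (M ++ b :: S)) P.length (P.length + M.length + 1) k s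
      = P ++ (skipAux (a :: (M ++ [b])) k s ++ S) := by
  induction n using Nat.strong_induction_on with
  | _ n IH =>
  intro M P S a b k s hn hk
  have hij : P.length < P.length + M.length + 1 := by omega
  rcases eq_or_ne s 0 with rfl | hs
  · rw [altLoop, if_neg (by simp)]
    rw [skipAux_swap_zero]
    simp
  rcases lt_or_ge 0 k with hkpos | hk0
  · -- skip step
    rw [altLoop, if_pos ⟨hij, hs⟩, if_pos hkpos, skipAux_skip a b M k s hkpos hs]
    rcases Nat.lt_or_ge M.length 2 with hM2 | hM2
    · -- middle too short: the next loop test fails on both sides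
      rw [altLoop, if_neg (by omega)]
      rw [skipAux_short M (k - 1) s (by omega)]
      simp
    · obtain ⟨c, d, M', hM⟩ := decomp M hM2
      subst hM
      rw [show P ++ a :: ((c :: (M' ++ [d])) ++ b :: S)
            = (P ++ [a]) ++ c :: (M' ++ d :: (b :: S)) by simp,
        show P.length + (c :: (M' ++ [d])).length + 1 - 1
            = (P ++ [a]).length + M'.length + 1 by simp; omega,
        show P.length + 1 = (P ++ [a]).length by simp]
      rw [IH M'.length (by simp at hn; omega) M' (P ++ [a]) (b :: S) c d (k - 1) s rfl
        (by omega)]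
      simp
  · -- swap step (k = 0)
    have hk0' : k = 0 := le_antisymm hk0 hk
    subst hk0'
    rw [altLoop, if_pos ⟨hij, hs⟩, if_neg (by omega)]
    rw [getD_mid_right P a M b S, getD_mid_left P a (M ++ b :: S),
      set_mid_left P a b (M ++ b :: S), set_mid_right P b M b a S]
    rw [skipAux_swap a b M s hs]
    rcases Nat.lt_or_ge M.length 2 with hM2 | hM2
    · rw [altLoop, if_neg (by omega)]
      rw [skipAux_short M 0 (s - 1) (by omega)]
      simp
    · obtain ⟨c, d, M', hM⟩ := decomp M hM2
      subst hM
      rw [show P ++ b :: ((c :: (M' ++ [d])) ++ a :: S)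
            = (P ++ [b]) ++ c :: (M' ++ d :: (a :: S)) by simp,
        show P.length + (c :: (M' ++ [d])).length + 1 - 1
            = (P ++ [b]).length + M'.length + 1 by simp; omega,
        show P.length + 1 = (P ++ [b]).length by simp]
      rw [IH M'.length (by simp at hn; omega) M' (P ++ [b]) (a :: S) c d 0 (s - 1) rfl
        le_rfl]
      simp

-- B is the identity when the loop cannot run
lemma altLoop_stop (chars : List Char) (i j : Nat) (k s : Int) (h : ¬(i < j ∧ s ≠ 0)) :
    altLoop chars i j k s = chars := by
  rw [altLoop, if_neg h]

-- ===== VERDICT (by name: the statement is the Claim_ definition above) =====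
theorem skip_then_swap_spec : Claim_equal_skip_then_swap := by
  intro string k s _ hPre
  unfold Spec_skip_then_swap skip_then_swap skip_then_swap_alt
  rcases eq_or_ne s 0 with rfl | hs
  · rw [skipAux_swap_zero, altLoop_stop _ _ _ _ _ (by simp)]
  · rcases Nat.lt_or_ge string.toList.length 2 with hlen | hlen
    · rw [skipAux_short string.toList k s (by omega),
        altLoop_stop _ _ _ _ _ (by omega)]
    · have hk : 0 <= k := by
        rcases hPre with h | h | h
        · omega
        · exact absurd h hs
        · exact h
      obtain ⟨a, b, m, hm⟩ := decomp string.toList hlen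
      rw [hm,
        show (a :: (m ++ [b])).length - 1 = ([] : List Char).length + m.length + 1 by simp,
        show a :: (m ++ [b]) = ([] : List Char) ++ a :: (m ++ b :: ([] : List Char)) by simp,
        show (0 : Nat) = ([] : List Char).length from rfl,
        loop_inv m.length m [] [] a b k s rfl hk]
      simp
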